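-- pv_equiv track=rewrite | github.com/clemdcz/Crypto | Crypto/lapileequitable.py | lapileequitable
-- ===== SOURCE A (Python) =====
-- def lapileequitable(mot):
--     """// ---------------- DEBUT EN TETE --------------------------------------//
-- // NOM :                    codage pile equitable                       //
-- //                                                                      //
-- // AUTEURS : E.chassagne B.balos C.da cruz E.bertrand                   //
-- //                                                                      //
-- // VERSION :    1.4                                  novembre 2020      //
-- // HISTORIQUE : Aucun                                                   //
-- //                                                                      //
-- // ENTREES :                                                            //
-- //    cap      texte en clair à coder                                    //                                                                      //                                                 //
-- // SORTIES :                                                            //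
-- //    texte    le texte codé avec la methode pile equitable             //                                                                      //                                                                      //
-- // MODIFIEES :                                                          //
-- //                                                                      //
-- // LOCALES :                                                            //
-- //             alphabet,                                                //
-- //                                                                      //
-- // FONCTIONS APPELEES :                                                 //
-- //                                                                      //
-- // ALGO - REFERENCES :                                                  //
-- //                                                                      //
-- // ---------------- FIN EN TETE ----------------------------------------//
--
--     """
--     motclaire = list(mot)
--     longeur = len(motclaire)
--     ordre = []
--     motcode = []
--     for i in range(longeur-1, 0, -2):
--         ordre.append(i)
--     for n in range(longeur, 0, -2):
--         ordre.append(n)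
--     for k in range (0, longeur):
--         numero = ordre[k] -1
--         motcode.append(motclaire[numero])
--     textecode = "".join(motcode)
--     return textecode
-- ===== SOURCE B (Python) =====
-- def lapileequitable(mot):
--     # Same pile-equitable reordering, computed with two strided slices
--     # instead of building an index-permutation table.
--     return mot[:-1][::-2] + mot[::-2]
-- ===== Notes on version B (the rewrite author's own statement) =====
-- stated objective: idiomatic
-- what changed: Replaces the explicit index-permutation list (two countdown loops building 'ordre' plus an indexed read loop) with two strided slice expressions mot[:-1][::-2] + mot[::-2]; no index table or read loop remains.
import Mathlib
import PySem

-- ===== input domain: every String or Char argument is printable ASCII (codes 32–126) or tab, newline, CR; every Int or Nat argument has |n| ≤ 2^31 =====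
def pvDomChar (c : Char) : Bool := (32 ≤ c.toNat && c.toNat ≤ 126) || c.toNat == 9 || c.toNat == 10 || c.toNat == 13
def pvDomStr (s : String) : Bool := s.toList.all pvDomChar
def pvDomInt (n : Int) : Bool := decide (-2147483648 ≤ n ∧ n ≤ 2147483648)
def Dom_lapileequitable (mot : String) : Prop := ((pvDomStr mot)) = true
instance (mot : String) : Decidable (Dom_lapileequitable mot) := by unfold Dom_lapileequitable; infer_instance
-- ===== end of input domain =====

-- B replaces A's hand-built index-permutation table and indexed read loop with two
-- strided slices mot[:-1][::-2] + mot[::-2] (idiomatic, same value on every string).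


-- ===== PORT A =====
def lapileequitable (mot : String) : String :=
  let motclaire := mot.toList
  let longeur : Int := (motclaire.length : Int)
  let ordre : List Int := []
  let ordre := (PySem.List.pyRange (longeur - 1) 0 (-2)).foldl (fun acc i => acc ++ [i]) ordre
  let ordre := (PySem.List.pyRange longeur 0 (-2)).foldl (fun acc n => acc ++ [n]) ordre
  -- 'numero' below is always a valid index (ordre has length 'longeur' and its entries lie
  -- in 1..longeur), so the defaults of pyGetD are never used and Python never raises here
  let motcode : List Char := (PySem.List.pyRange 0 longeur 1).foldl
    (fun acc k => acc ++ [PySem.List.pyGetD motclaire (PySem.List.pyGetD ordre k 0 - 1) ' ']) []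
  String.ofList motcode

-- ===== PORT B =====
def lapileequitable_alt (mot : String) : String :=
  ((PySem.Str.slice? (PySem.Str.slice mot none (some (-1))) none none (-2)).getD "")
    ++ ((PySem.Str.slice? mot none none (-2)).getD "")

-- ===== PRECONDITION & SPEC =====
def Spec_lapileequitable (mot : String) (out : String) : Prop := out = lapileequitable_alt mot
instance (mot : String) (out : String) : Decidable (Spec_lapileequitable mot out) := by unfold Spec_lapileequitable; infer_instance

-- ===== CLAIM (what is proved, stated in full; the proofs are below) =====
def Claim_equal_lapileequitable : Prop := ∀ (mot : String), Dom_lapileequitable mot → Spec_lapileequitable mot (lapileequitable mot)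

-- ===== LEMMAS AND PROOFS =====

-- a foldl that appends singletons is a map
theorem pvFoldlApp {α β : Type} (f : α → β) (xs : List α) (acc : List β) :
    xs.foldl (fun a x => a ++ [f x]) acc = acc ++ xs.map f := by
  induction xs generalizing acc with
  | nil => simp
  | cons x xs ih => simp [ih]

-- reading 'ordre' back element by element over range(len(ordre)) is mapping over 'ordre'
theorem pvMapComp' (xs : List Int) (l : List Char) :
    (PySem.List.pyRange 0 (xs.length : Int) 1).map
        (fun k => PySem.List.pyGetD l (PySem.List.pyGetD xs k 0 - 1) ' ')
      = xs.map (fun o => PySem.List.pyGetD l (o - 1) ' ') := by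
  conv_rhs => rw [← PySem.List.map_pyGetD_pyRange_zero' xs 0, List.map_map]
  rfl

-- range(a, 0, -2) as a map over List.range
theorem pvRangeNegTwo (a : Int) :
    PySem.List.pyRange a 0 (-2)
      = (List.range (if 0 < a then ((a + 1) / 2).toNat else 0)).map (fun (k : Nat) => a - 2 * (k : Int)) := by
  unfold PySem.List.pyRange
  rw [if_neg (by norm_num), if_neg (by norm_num)]
  have h1 : a - 0 + - -2 - 1 = a + 1 := by ring
  rw [h1]
  norm_num
  intro k _
  ring

-- xs[::-2] as a map over List.range (every index is in range, so filterMap is a map)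
theorem pvSliceNegTwo (xs : List Char) :
    PySem.List.slice? xs none none (-2)
      = some ((List.range (if 0 < xs.length then (((xs.length : Int) + 1) / 2).toNat else 0)).map
          (fun (k : Nat) => PySem.List.pyGetD xs ((xs.length : Int) - 1 - 2 * (k : Int)) ' ')) := by
  unfold PySem.List.slice? PySem.List.sliceIndices
  rw [if_neg (by norm_num)]
  norm_num
  have h2 : ((xs.length : Int) + 2 - 1) = (xs.length : Int) + 1 := by ring
  rw [h2]
  rw [List.filterMap_congr (g := fun (k : Nat) => some (PySem.List.pyGetD xs ((xs.length : Int) - 1 - 2 * (k : Int)) ' '))]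
  · rw [show (fun (k : Nat) => some (PySem.List.pyGetD xs ((xs.length : Int) - 1 - 2 * (k : Int)) ' '))
        = some ∘ (fun (k : Nat) => PySem.List.pyGetD xs ((xs.length : Int) - 1 - 2 * (k : Int)) ' ') from rfl,
      List.filterMap_eq_map]
  · intro k hk
    simp only [List.mem_range] at hk
    by_cases hn : 0 < xs.length
    · rw [if_pos hn] at hk
      have h0 : (0 : Int) ≤ (xs.length : Int) - 1 - 2 * (k : Int) := by omega
      have h1 : (xs.length : Int) - 1 - 2 * (k : Int) < (xs.length : Int) := by omega
      have he : ((xs.length : Int) - 1 + -(2 * (k : Int))) = (xs.length : Int) - 1 - 2 * (k : Int) := by ring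
      rw [he, PySem.List.pyGetD_eq_getElem xs ' ' h0 h1, List.getElem?_eq_getElem (by omega)]
    · rw [if_neg hn] at hk; omega

-- A in normal form: the characters of l read through the permutation R1 ++ R2
theorem pvA (l : List Char) :
    lapileequitable (String.ofList l)
      = String.ofList
          (((PySem.List.pyRange ((l.length : Int) - 1) 0 (-2)) ++ PySem.List.pyRange (l.length : Int) 0 (-2)).map
            (fun o => PySem.List.pyGetD l (o - 1) ' ')) := by
  unfold lapileequitable
  simp only [String.toList_ofList, pvFoldlApp, List.map_id', List.nil_append]
  set xs := (PySem.List.pyRange ((l.length : Int) - 1) 0 (-2)) ++ PySem.List.pyRange (l.length : Int) 0 (-2) with hxs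
  have hlen : ((xs.length : Nat) : Int) = (l.length : Int) := by
    rw [hxs]
    simp only [List.length_append, pvRangeNegTwo, List.length_map, List.length_range]
    push_cast
    omega
  rw [show PySem.List.pyRange 0 (l.length : Int) 1 = PySem.List.pyRange 0 ((xs.length : Nat) : Int) 1 by rw [hlen]]
  rw [pvMapComp' xs l]

theorem pvCore (l : List Char) :
    lapileequitable (String.ofList l) = lapileequitable_alt (String.ofList l) := by
  rw [pvA]
  unfold lapileequitable_alt
  simp only [PySem.Str.slice, PySem.Str.slice?, PySem.Chars.slice, PySem.Chars.slice?,
    String.toList_ofList, PySem.List.slice_to_neg_one, pvSliceNegTwo, Option.map_some,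
    Option.getD_some, List.length_dropLast]
  rw [← String.ofList_append]
  rw [pvRangeNegTwo ((l.length : Int) - 1), pvRangeNegTwo (l.length : Int)]
  simp only [List.map_append, List.map_map]
  congr 1
  congr 1
  -- first chunk: dropLast slice vs first countdown loop
  · have hc : (if 0 < l.length - 1 then (((l.length - 1 : Nat) : Int) + 1) / 2 |>.toNat else 0)
        = (if 0 < (l.length : Int) - 1 then (((l.length : Int) - 1 + 1) / 2).toNat else 0) := by
      split_ifs <;> omega
    rw [hc]
    apply List.map_congr_left
    intro k hk
    simp only [List.mem_range] at hk
    by_cases hn : 0 < (l.length : Int) - 1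
    · rw [if_pos hn] at hk
      simp only [Function.comp]
      have hM : ((l.length - 1 : Nat) : Int) = (l.length : Int) - 1 := by omega
      rw [hM]
      have h0 : (0 : Int) ≤ (l.length : Int) - 1 - 1 - 2 * (k : Int) := by omega
      have h1 : (l.length : Int) - 1 - 1 - 2 * (k : Int) < ((l.dropLast.length : Nat) : Int) := by
        simp only [List.length_dropLast]; omega
      have h1' : (l.length : Int) - 1 - 1 - 2 * (k : Int) < (l.length : Int) := by omega
      have he : (l.length : Int) - 1 - 2 * (k : Int) - 1 = (l.length : Int) - 1 - 1 - 2 * (k : Int) := by ring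
      rw [he, PySem.List.pyGetD_eq_getElem l.dropLast ' ' h0 h1,
        PySem.List.pyGetD_eq_getElem l ' ' h0 h1']
      exact (List.getElem_dropLast _).symm
    · rw [if_neg hn] at hk; omega
  -- second chunk: full slice vs second countdown loop
  · have hc : (if 0 < l.length then ((l.length : Int) + 1) / 2 |>.toNat else 0)
        = (if 0 < (l.length : Int) then (((l.length : Int) + 1) / 2).toNat else 0) := by
      split_ifs <;> omega
    rw [hc]
    apply List.map_congr_left
    intro k _
    simp only [Function.comp]
    have he : (l.length : Int) - 2 * (k : Int) - 1 = (l.length : Int) - 1 - 2 * (k : Int) := by ring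
    rw [he]

-- ===== VERDICT (by name: the statement is the Claim_ definition above) =====
theorem lapileequitable_spec : Claim_equal_lapileequitable := by
  intro mot _
  unfold Spec_lapileequitable
  have h := pvCore mot.toList
  simpa using h
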